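-- pv_equiv track=rewrite | github.com/pvfeldt/KARV | retrieval/intersect_and_vote.py | delete_loop
-- ===== SOURCE A (Python) =====
-- def delete_loop(data):
--     new_context=[]
--     for i in range(len(data)):
--         split_context=data[i].split("->")
--         ent_split=[]
--         for split in split_context:
--             if split.count(".")<2:
--                 ent_split.append(split)
--         processed_split=list(set(ent_split))
--         # if length!=, a loop exists
--         if len(processed_split)==len(ent_split):
--             new_context.append(data[i])
--     return new_context
-- ===== SOURCE B (Python) =====
-- def delete_loop(data):
--     result = []
--     for item in data:
--         seen = set()
--         has_dup = False
--         for split in item.split("->"):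
--             if split.count(".") < 2:
--                 if split in seen:
--                     has_dup = True
--                     break
--                 seen.add(split)
--         if not has_dup:
--             result.append(item)
--     return result
-- ===== Notes on version B (the rewrite author's own statement) =====
-- stated objective: simpler
-- what changed: Replaces the filter-then-set-then-length-compare per item with a single early-exiting pass over the '->'-splits that maintains a seen set and a has_dup flag.
import Mathlib
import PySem

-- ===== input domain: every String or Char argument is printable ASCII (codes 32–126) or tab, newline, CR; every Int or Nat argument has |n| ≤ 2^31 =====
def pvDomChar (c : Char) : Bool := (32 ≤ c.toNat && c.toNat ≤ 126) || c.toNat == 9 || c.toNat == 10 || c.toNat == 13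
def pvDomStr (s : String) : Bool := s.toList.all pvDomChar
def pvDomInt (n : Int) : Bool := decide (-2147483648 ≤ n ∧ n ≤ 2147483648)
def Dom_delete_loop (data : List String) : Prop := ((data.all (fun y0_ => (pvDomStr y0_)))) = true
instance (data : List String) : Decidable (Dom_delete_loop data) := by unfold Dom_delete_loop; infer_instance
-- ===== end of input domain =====

-- B replaces A's filter-then-set-then-length-compare per item with one early-exiting
-- pass over the '->'-splits maintaining a seen set and a dup flag (objective: simpler).

-- the separator "->" is a nonempty literal, so split? is always `some`; `.getD []` only totalizes
def pvSplit (s : String) : List String := (PySem.Str.split? s "->").getD []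

-- ===== PORT A =====
-- the body of A's outer loop (data[i] passed once; A reads the same data[i] twice)
def pvStep (new_context : List String) (s : String) : List String :=
  let split_context := pvSplit s
  let ent_split := split_context.foldl
    (fun acc split => if PySem.Str.count split "." < 2 then acc ++ [split] else acc) []
  let processed_split := PySem.Set.ofList ent_split
  if processed_split.length == ent_split.length
    then new_context ++ [s]
    else new_context

def delete_loop (data : List String) : List String :=
  (PySem.List.pyRange 0 (data.length : Int) 1).foldl
    (fun new_context i => pvStep new_context (PySem.List.pyGetD data i "")) []

-- ===== PORT B =====
def pvHasDup : List String → PySem.Set String → Bool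
  | [], _ => false
  | split :: rest, seen =>
    if PySem.Str.count split "." < 2 then
      if PySem.Set.contains seen split then true
      else pvHasDup rest (PySem.Set.add seen split)
    else pvHasDup rest seen

def delete_loop_alt : List String → List String
  | [] => []
  | item :: rest =>
    if pvHasDup (pvSplit item) PySem.Set.empty
      then delete_loop_alt rest
      else item :: delete_loop_alt rest

-- ===== PRECONDITION & SPEC =====
def Spec_delete_loop (data : List String) (out : List String) : Prop := out = delete_loop_alt data
instance (data : List String) (out : List String) : Decidable (Spec_delete_loop data out) := by unfold Spec_delete_loop; infer_instance

-- ===== CLAIM (what is proved, stated in full; the proofs are below) =====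
def Claim_equal_delete_loop : Prop := ∀ (data : List String), Dom_delete_loop data → Spec_delete_loop data (delete_loop data)

-- ===== LEMMAS AND PROOFS =====

-- ofList keeps a subsequence (first occurrences) of its argument
theorem pv_ofList_sublist (l : List String) : (PySem.Set.ofList l).Sublist l := by
  induction l using List.reverseRecOn with
  | nil => simp [PySem.Set.ofList_nil]
  | append_singleton xs x ih =>
    rw [PySem.Set.ofList_append_singleton, PySem.Set.add_eq_ite]
    split_ifs with h
    · exact ih.trans (List.sublist_append_left xs [x])
    · exact ih.append_right [x]

theorem pv_len_ofList_iff (l : List String) :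
    ((PySem.Set.ofList l).length == l.length) = true ↔ l.Nodup := by
  constructor
  · intro h
    have he : PySem.Set.ofList l = l :=
      (pv_ofList_sublist l).eq_of_length (by simpa using h)
    have hn := PySem.Set.nodup_ofList (xs := l)
    rwa [he] at hn
  · intro h
    rw [PySem.Set.ofList_eq_self_of_nodup l h]
    simp

-- the early-exit pass returns false iff the kept splits are fresh and pairwise distinct
theorem pv_hasDup_false_iff (parts : List String) (seen : PySem.Set String) :
    pvHasDup parts seen = false ↔
      ((parts.filter (fun s => PySem.Str.count s "." < 2)).Nodup ∧
        ∀ x ∈ parts.filter (fun s => PySem.Str.count s "." < 2), x ∉ seen) := by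
  induction parts generalizing seen with
  | nil => simp [pvHasDup]
  | cons p rest ih =>
    simp only [pvHasDup]
    by_cases hp : PySem.Str.count p "." < 2
    · rw [if_pos hp]
      simp only [List.filter_cons, hp, decide_true, if_pos, List.nodup_cons, List.mem_cons]
      cases hc : PySem.Set.contains seen p with
      | true =>
        have hs : p ∈ seen := (PySem.Set.contains_iff seen p).1 hc
        simp only [hc, if_true]
        constructor
        · intro h; cases h
        · rintro ⟨_, hf⟩
          exact absurd hs (hf p (Or.inl rfl))
      | false =>
        have hs : p ∉ seen := fun hm => by
          rw [(PySem.Set.contains_iff seen p).2 hm] at hc; cases hc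
        simp only [hc, Bool.false_eq_true, if_neg, ite_false]
        rw [ih]
        constructor
        · rintro ⟨hn, hf⟩
          have hnp : p ∉ rest.filter (fun s => PySem.Str.count s "." < 2) := fun hm =>
            (hf p hm) ((PySem.Set.mem_add _ _ _).2 (Or.inr rfl))
          refine ⟨⟨hnp, hn⟩, ?_⟩
          rintro x (rfl | hx)
          · exact hs
          · exact fun hxs => (hf x hx) ((PySem.Set.mem_add _ _ _).2 (Or.inl hxs))
        · rintro ⟨⟨hnp, hn⟩, hf⟩
          refine ⟨hn, fun x hx hxa => ?_⟩
          rcases (PySem.Set.mem_add _ _ _).1 hxa with hxs | rfl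
          · exact hf x (Or.inr hx) hxs
          · exact hnp hx
    · rw [if_neg hp, ih]
      simp [List.filter_cons, show ¬ (PySem.Chars.count p.toList ['.'] ≤ 1) from by simpa using hp]

theorem pv_alt_eq_filter (data : List String) :
    delete_loop_alt data =
      data.filter (fun s => !pvHasDup (pvSplit s) PySem.Set.empty) := by
  induction data with
  | nil => rfl
  | cons x rest ih =>
    cases h : pvHasDup (pvSplit x) ([] : PySem.Set String) <;>
      simp [delete_loop_alt, PySem.Set.empty, h, ih, List.filter_cons]

-- per item: A's length comparison agrees with B's early-exit flag
theorem pv_item_iff (s : String) :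
    ((PySem.Set.ofList ((pvSplit s).filter
        (fun t => PySem.Str.count t "." < 2))).length ==
      ((pvSplit s).filter (fun t => PySem.Str.count t "." < 2)).length)
      = !pvHasDup (pvSplit s) PySem.Set.empty := by
  cases h : pvHasDup (pvSplit s) PySem.Set.empty with
  | false =>
    have hn := (pv_hasDup_false_iff (pvSplit s) PySem.Set.empty).1 h
    simpa using (pv_len_ofList_iff _).2 hn.1
  | true =>
    simp only [Bool.not_true]
    rw [Bool.eq_false_iff]
    intro hc
    have hn := (pv_len_ofList_iff _).1 hc
    have hfalse : pvHasDup (pvSplit s) PySem.Set.empty = false :=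
      (pv_hasDup_false_iff _ _).2 ⟨hn, by simp [PySem.Set.empty]⟩
    rw [h] at hfalse; cases hfalse

-- A's loop body, rewritten through the per-item bridge
theorem pv_step_eq (acc : List String) (s : String) :
    pvStep acc s = if !pvHasDup (pvSplit s) PySem.Set.empty then acc ++ [s] else acc := by
  unfold pvStep
  simp only [PySem.List.foldl_append_ite_eq_filter, List.nil_append]
  rw [pv_item_iff]

-- ===== VERDICT (by name: the statement is the Claim_ definition above) =====
theorem delete_loop_spec : Claim_equal_delete_loop := by
  intro data _
  unfold Spec_delete_loop delete_loop
  rw [PySem.List.foldl_pyRange_zero_pyGetD']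
  rw [pv_alt_eq_filter]
  have hstep : pvStep = fun acc s =>
      if !pvHasDup (pvSplit s) PySem.Set.empty then acc ++ [s] else acc :=
    funext fun acc => funext fun s => pv_step_eq acc s
  rw [hstep]
  rw [PySem.List.foldl_append_if_eq_filter]
  simp
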